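-- pv_equiv track=rewrite | github.com/Ainsley2007/board_tracker | board/board_detector.py | _pop_end_tile
-- ===== SOURCE A (Python) =====
-- from typing import List, Tuple
--
-- _END_TILE_MIN_AREA = 35_000
--
-- def _pop_end_tile(
--     boxes: List[Tuple[int, int, int, int]],
-- ) -> tuple[List[Tuple[int, int, int, int]], Tuple[int, int, int, int] | None]:
--     candidates = [
--         (i, b) for i, b in enumerate(boxes) if b[2] * b[3] >= _END_TILE_MIN_AREA
--     ]
--     if not candidates:
--         return boxes, None
--     end_i, end = max(candidates, key=lambda ib: ib[1][2] * ib[1][3])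
--     path = [b for i, b in enumerate(boxes) if i != end_i]
--     return path, end
-- ===== SOURCE B (Python) =====
-- _END_TILE_MIN_AREA = 35_000
--
-- def _pop_end_tile(boxes):
--     # Stable sort of the indices by descending area: the head is the first
--     # index attaining the maximum area (Python's sort is stable, so ties keep
--     # original order, matching max()'s first-maximum rule).
--     order = sorted(range(len(boxes)), key=lambda i: -(boxes[i][2] * boxes[i][3]))
--     if not order:
--         return boxes, None
--     i = order[0]
--     end = boxes[i]
--     if end[2] * end[3] < _END_TILE_MIN_AREA:
--         return boxes, None
--     return boxes[:i] + boxes[i + 1:], end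
-- ===== Notes on version B (the rewrite author's own statement) =====
-- stated objective: alternative
-- what changed: Sort-based argmax: stably sort the index list by descending area and take the head (stability gives the first maximum), then remove it by slicing, instead of filter-candidates / max over pairs / re-filter by index.
import Mathlib
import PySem

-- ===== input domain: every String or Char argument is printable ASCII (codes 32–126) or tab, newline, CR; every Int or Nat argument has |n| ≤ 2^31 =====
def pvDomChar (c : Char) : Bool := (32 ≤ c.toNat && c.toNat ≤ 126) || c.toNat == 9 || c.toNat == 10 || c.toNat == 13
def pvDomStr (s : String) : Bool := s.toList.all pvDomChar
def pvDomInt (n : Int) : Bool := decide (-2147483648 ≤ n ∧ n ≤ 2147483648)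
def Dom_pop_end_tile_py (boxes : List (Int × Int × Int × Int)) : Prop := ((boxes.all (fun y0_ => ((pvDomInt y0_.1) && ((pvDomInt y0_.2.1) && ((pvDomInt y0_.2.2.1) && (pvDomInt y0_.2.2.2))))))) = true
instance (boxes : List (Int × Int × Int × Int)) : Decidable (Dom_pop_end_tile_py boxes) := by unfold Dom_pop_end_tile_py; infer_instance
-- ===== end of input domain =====

-- B finds the end tile by stably sorting the index list by descending area (the head is then the first maximum) and removing it by slicing — a sort-based alternative to A's filter/max/re-filter pipeline.


-- ===== PORT A =====
def pop_end_tile_py (boxes : List (Int × Int × Int × Int)) : (List (Int × Int × Int × Int)) × (Option (Int × Int × Int × Int)) :=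
  let candidates := (PySem.List.enumerate boxes).filter (fun ib => 35000 ≤ ib.2.2.2.1 * ib.2.2.2.2)
  if candidates.isEmpty then (boxes, none)
  else
    match PySem.List.max? candidates (fun ib => ib.2.2.2.1 * ib.2.2.2.2) with
    | none => (boxes, none)  -- unreachable: candidates is nonempty
    | some (end_i, e) =>
      (((PySem.List.enumerate boxes).filter (fun ib => ib.1 != end_i)).map Prod.snd, some e)

-- ===== PORT B =====
-- key i = -(boxes[i][2] * boxes[i][3]); the indices come from range(len(boxes)), so the lookup is always in range (getD's default is never used)
def pvKeyB (boxes : List (Int × Int × Int × Int)) (i : Int) : Int :=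
  -((PySem.List.pyGetD boxes i (0, 0, 0, 0)).2.2.1 * (PySem.List.pyGetD boxes i (0, 0, 0, 0)).2.2.2)

def pop_end_tile_py_alt (boxes : List (Int × Int × Int × Int)) : (List (Int × Int × Int × Int)) × (Option (Int × Int × Int × Int)) :=
  match PySem.List.sorted (PySem.List.pyRange 0 (boxes.length : Int) 1) (pvKeyB boxes) with
  | [] => (boxes, none)
  | i :: _ =>
    if (PySem.List.pyGetD boxes i (0, 0, 0, 0)).2.2.1 * (PySem.List.pyGetD boxes i (0, 0, 0, 0)).2.2.2 < 35000
    then (boxes, none)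
    else (PySem.List.slice boxes none (some i) ++ PySem.List.slice boxes (some (i + 1)) none,
          some (PySem.List.pyGetD boxes i (0, 0, 0, 0)))

-- ===== PRECONDITION & SPEC =====
def Spec_pop_end_tile_py (boxes : List (Int × Int × Int × Int)) (out : (List (Int × Int × Int × Int)) × (Option (Int × Int × Int × Int))) : Prop := out = pop_end_tile_py_alt boxes
instance (boxes : List (Int × Int × Int × Int)) (out : (List (Int × Int × Int × Int)) × (Option (Int × Int × Int × Int))) : Decidable (Spec_pop_end_tile_py boxes out) := by unfold Spec_pop_end_tile_py; infer_instance

-- ===== CLAIM (what is proved, stated in full; the proofs are below) =====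
def Claim_equal_pop_end_tile_py : Prop := ∀ (boxes : List (Int × Int × Int × Int)), Dom_pop_end_tile_py boxes → Spec_pop_end_tile_py boxes (pop_end_tile_py boxes)

-- ===== LEMMAS AND PROOFS =====

-- area of a box
def pvArea (b : Int × Int × Int × Int) : Int := b.2.2.1 * b.2.2.2

-- first index/value of the maximum-area element among those with area > ar
def pvMid (bs : List (Int × Int × Int × Int)) (ar : Int) : Option (Nat × (Int × Int × Int × Int)) :=
  match bs with
  | [] => none
  | b :: t =>
    if ar < pvArea b then
      match pvMid t (pvArea b) with
      | none => some (0, b)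
      | some (i, c) => some (i + 1, c)
    else
      match pvMid t ar with
      | none => none
      | some (i, c) => some (i + 1, c)

theorem pvMid_getElem : ∀ (bs : List (Int × Int × Int × Int)) (ar : Int) (k : Nat) (c : (Int × Int × Int × Int)),
    pvMid bs ar = some (k, c) → ∃ h : k < bs.length, c = bs[k] := by
  intro bs
  induction bs with
  | nil => intro ar k c h; simp [pvMid] at h
  | cons b t ih =>
    intro ar k c h
    simp only [pvMid] at h
    split_ifs at h
    · cases hm : pvMid t (pvArea b) with
      | none => rw [hm] at h; simp at h; obtain ⟨hk, hc⟩ := h; subst hk; subst hc; exact ⟨by simp, rfl⟩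
      | some ic =>
        rw [hm] at h; cases ic with
        | mk i c' =>
          simp at h; obtain ⟨hk, hc⟩ := h
          obtain ⟨hlt, hget⟩ := ih (pvArea b) i c' hm
          subst hk; subst hc
          exact ⟨by simpa using Nat.succ_lt_succ hlt, by simpa using hget⟩
    · cases hm : pvMid t ar with
      | none => rw [hm] at h; simp at h
      | some ic =>
        rw [hm] at h; cases ic with
        | mk i c' =>
          simp at h; obtain ⟨hk, hc⟩ := h
          obtain ⟨hlt, hget⟩ := ih ar i c' hm
          subst hk; subst hc
          exact ⟨by simpa using Nat.succ_lt_succ hlt, by simpa using hget⟩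

-- ---- A side ----

-- hand-rolled "first max" scan matching max?'s foldl
def pvPick (m : Int × (Int × Int × Int × Int)) (l : List (Int × (Int × Int × Int × Int))) : Int × (Int × Int × Int × Int) :=
  match l with
  | [] => m
  | x :: t => if pvArea m.2 < pvArea x.2 then pvPick x t else pvPick m t

theorem pvMax?_cons : ∀ (t : List (Int × (Int × Int × Int × Int))) (m : Int × (Int × Int × Int × Int)),
    PySem.List.max? (m :: t) (fun ib => pvArea ib.2) = some (pvPick m t) := by
  intro t
  induction t with
  | nil => intro m; rfl
  | cons x t ih =>
    intro m
    have h1 : PySem.List.max? (m :: x :: t) (fun ib => pvArea ib.2) =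
        PySem.List.max? ((if pvArea m.2 < pvArea x.2 then x else m) :: t) (fun ib => pvArea ib.2) := by
      simp only [PySem.List.max?, List.foldl]
      split_ifs <;> rfl
    rw [h1]
    by_cases h : pvArea m.2 < pvArea x.2
    · rw [if_pos h, ih x]
      simp [pvPick, h]
    · rw [if_neg h, ih m]
      simp [pvPick, h]

theorem pvPick_cands : ∀ (bs : List (Int × Int × Int × Int)) (s : Int) (m : Int × (Int × Int × Int × Int)),
    34999 ≤ pvArea m.2 →
    pvPick m ((PySem.List.enumerate bs s).filter (fun ib => 35000 ≤ pvArea ib.2)) =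
      (match pvMid bs (pvArea m.2) with
       | none => m
       | some (k, c) => (s + k, c)) := by
  intro bs
  induction bs with
  | nil => intro s m _; simp [PySem.List.enumerate, pvMid, pvPick]
  | cons b t ih =>
    intro s m hm
    rw [PySem.List.enumerate_cons]
    by_cases hc : 35000 ≤ pvArea b
    · rw [List.filter_cons_of_pos (by simpa using hc)]
      simp only [pvPick]
      by_cases hlt : pvArea m.2 < pvArea b
      · rw [if_pos (by simpa using hlt)]
        rw [ih (s + 1) (s, b) (by simp; omega)]
        simp only [pvMid, if_pos hlt]
        cases pvMid t (pvArea b) with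
        | none => simp
        | some ic => cases ic; simp; ring
      · rw [if_neg (by simpa using hlt)]
        rw [ih (s + 1) m hm]
        simp only [pvMid, if_neg hlt]
        cases pvMid t (pvArea m.2) with
        | none => simp
        | some ic => cases ic; simp; ring
    · rw [List.filter_cons_of_neg (by simpa using hc)]
      have hlt : ¬ pvArea m.2 < pvArea b := by omega
      rw [ih (s + 1) m hm]
      simp only [pvMid, if_neg hlt]
      cases pvMid t (pvArea m.2) with
      | none => simp
      | some ic => cases ic; simp; ring

-- candidates / max? characterised by pvMid at threshold 34999
theorem pvMaxA : ∀ (bs : List (Int × Int × Int × Int)) (s : Int),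
    (match pvMid bs 34999 with
     | none => (PySem.List.enumerate bs s).filter (fun ib => 35000 ≤ pvArea ib.2) = []
     | some (k, c) =>
        PySem.List.max? ((PySem.List.enumerate bs s).filter (fun ib => 35000 ≤ pvArea ib.2))
          (fun ib => pvArea ib.2) = some (s + k, c)) := by
  intro bs
  induction bs with
  | nil => intro s; simp [PySem.List.enumerate, pvMid]
  | cons b t ih =>
    intro s
    rw [PySem.List.enumerate_cons]
    by_cases hc : 35000 ≤ pvArea b
    · have hlt : (34999 : Int) < pvArea b := by omega
      rw [List.filter_cons_of_pos (by simpa using hc)]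
      simp only [pvMid, if_pos hlt]
      have hpick := pvPick_cands t (s + 1) (s, b) (by simp; omega)
      cases hm : pvMid t (pvArea b) with
      | none =>
        rw [hm] at hpick
        rw [pvMax?_cons _ (s, b), hpick]
        simp
      | some ic =>
        cases ic with
        | mk i c =>
          rw [hm] at hpick
          rw [pvMax?_cons _ (s, b), hpick]
          simp; ring
    · have hlt : ¬ (34999 : Int) < pvArea b := by omega
      rw [List.filter_cons_of_neg (by simpa using hc)]
      have iht := ih (s + 1)
      simp only [pvMid, if_neg hlt]
      cases hm : pvMid t 34999 with
      | none => rw [hm] at iht; exact iht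
      | some ic =>
        cases ic with
        | mk i c =>
          rw [hm] at iht
          rw [iht]
          simp; ring

theorem pvEnum_filter_all : ∀ (bs : List (Int × Int × Int × Int)) (t j : Int), j < t →
    (PySem.List.enumerate bs t).filter (fun ib => ib.1 != j) = PySem.List.enumerate bs t := by
  intro bs
  induction bs with
  | nil => intro t j _; simp [PySem.List.enumerate]
  | cons b bs ih =>
    intro t j hj
    rw [PySem.List.enumerate_cons]
    rw [List.filter_cons_of_pos (by simp; omega)]
    rw [ih (t + 1) j (by omega)]

theorem pvFilter_ne_eraseIdx : ∀ (bs : List (Int × Int × Int × Int)) (k : Nat), k < bs.length → ∀ (s : Int),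
    ((PySem.List.enumerate bs s).filter (fun ib => ib.1 != s + (k : Int))).map Prod.snd = bs.eraseIdx k := by
  intro bs
  induction bs with
  | nil => intro k hk; simp at hk
  | cons b t ih =>
    intro k hk s
    rw [PySem.List.enumerate_cons]
    cases k with
    | zero =>
      rw [List.filter_cons_of_neg (by simp)]
      rw [pvEnum_filter_all t (s + 1) (s + ((0 : Nat) : Int)) (by push_cast; omega)]
      simp [PySem.List.map_snd_enumerate]
    | succ k =>
      rw [List.filter_cons_of_pos (by simp; omega)]
      simp only [List.map_cons, List.eraseIdx_cons_succ]
      have heq : (fun ib : Int × (Int × Int × Int × Int) => ib.1 != s + ((k + 1 : Nat) : Int)) =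
          (fun ib : Int × (Int × Int × Int × Int) => ib.1 != (s + 1) + ((k : Nat) : Int)) := by
        funext ib
        congr 1
        push_cast
        ring
      rw [heq, ih k (by simpa using Nat.lt_of_succ_lt_succ hk) (s + 1)]

-- A equals the pvMid-characterised result
theorem pop_end_tile_py_char (boxes : List (Int × Int × Int × Int)) :
    pop_end_tile_py boxes =
      (match pvMid boxes 34999 with
       | none => (boxes, none)
       | some (k, c) => (boxes.eraseIdx k, some c)) := by
  have hA := pvMaxA boxes 0
  cases hm : pvMid boxes 34999 with
  | none =>
    rw [hm] at hA
    simp only [pop_end_tile_py]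
    rw [show ((PySem.List.enumerate boxes 0).filter (fun ib => decide (35000 ≤ ib.2.2.2.1 * ib.2.2.2.2))) = [] from by
      simpa [pvArea] using hA]
    simp
  | some kc =>
    cases kc with
    | mk k c =>
      rw [hm] at hA
      simp only [pop_end_tile_py]
      have hA' : PySem.List.max? ((PySem.List.enumerate boxes 0).filter (fun ib => decide (35000 ≤ ib.2.2.2.1 * ib.2.2.2.2))) (fun ib => ib.2.2.2.1 * ib.2.2.2.2) = some (0 + (k : Int), c) := by
        simpa [pvArea] using hA
      have hne : ¬ ((PySem.List.enumerate boxes 0).filter (fun ib => decide (35000 ≤ ib.2.2.2.1 * ib.2.2.2.2))).isEmpty = true := by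
        intro h
        rw [List.isEmpty_iff] at h
        rw [h] at hA'
        simp [PySem.List.max?] at hA'
      rw [if_neg hne, hA']
      obtain ⟨hk, hc⟩ := pvMid_getElem boxes 34999 k c hm
      have herase := pvFilter_ne_eraseIdx boxes k hk 0
      simp only [zero_add] at herase hA' ⊢
      rw [herase, hc]

-- ---- B side ----

-- facts about pvMid used to read off the head of the sorted index list

theorem pvMid_none_iff : ∀ (bs : List (Int × Int × Int × Int)) (ar : Int),
    pvMid bs ar = none ↔ ∀ b ∈ bs, pvArea b ≤ ar := by
  intro bs
  induction bs with
  | nil => intro ar; simp [pvMid]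
  | cons b t ih =>
    intro ar
    simp only [pvMid]
    by_cases hb : ar < pvArea b
    · rw [if_pos hb]
      constructor
      · intro h
        exfalso
        cases hm : pvMid t (pvArea b) with
        | none => rw [hm] at h; simp at h
        | some ic => rw [hm] at h; cases ic; simp at h
      · intro h
        exfalso
        exact absurd (h b (by simp)) (by omega)
    · rw [if_neg hb]
      constructor
      · intro h y hy
        cases hm : pvMid t ar with
        | none =>
          rcases List.mem_cons.mp hy with rfl | hyt
          · omega
          · exact (ih ar).mp hm y hyt
        | some ic => rw [hm] at h; cases ic; simp at h
      · intro h
        rw [(ih ar).mpr (fun y hy => h y (List.mem_cons_of_mem _ hy))]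

theorem pvMid_lt : ∀ (bs : List (Int × Int × Int × Int)) (ar : Int) (k : Nat) (c : (Int × Int × Int × Int)),
    pvMid bs ar = some (k, c) → ar < pvArea c := by
  intro bs
  induction bs with
  | nil => intro ar k c h; simp [pvMid] at h
  | cons b t ih =>
    intro ar k c h
    simp only [pvMid] at h
    split_ifs at h with hb
    · cases hm : pvMid t (pvArea b) with
      | none =>
        rw [hm] at h; simp at h
        obtain ⟨hk, hc⟩ := h
        subst hc
        exact hb
      | some ic =>
        cases ic with
        | mk i c' =>
          rw [hm] at h; simp at h
          obtain ⟨hk, hc⟩ := h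
          subst hc
          have := ih (pvArea b) i c' hm
          omega
    · cases hm : pvMid t ar with
      | none => rw [hm] at h; simp at h
      | some ic =>
        cases ic with
        | mk i c' =>
          rw [hm] at h; simp at h
          obtain ⟨hk, hc⟩ := h
          subst hc
          exact ih ar i c' hm

theorem pvMid_max : ∀ (bs : List (Int × Int × Int × Int)) (ar : Int) (k : Nat) (c : (Int × Int × Int × Int)),
    pvMid bs ar = some (k, c) → ∀ y ∈ bs, pvArea y ≤ pvArea c := by
  intro bs
  induction bs with
  | nil => intro ar k c h; simp [pvMid] at h
  | cons b t ih =>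
    intro ar k c h y hy
    simp only [pvMid] at h
    split_ifs at h with hb
    · cases hm : pvMid t (pvArea b) with
      | none =>
        rw [hm] at h; simp at h
        obtain ⟨hk, hc⟩ := h
        subst hc
        rcases List.mem_cons.mp hy with rfl | hyt
        · exact le_refl _
        · exact (pvMid_none_iff t (pvArea b)).mp hm y hyt
      | some ic =>
        cases ic with
        | mk i c' =>
          rw [hm] at h; simp at h
          obtain ⟨hk, hc⟩ := h
          subst hc
          have hb' := pvMid_lt t (pvArea b) i c' hm
          rcases List.mem_cons.mp hy with rfl | hyt
          · omega
          · exact ih (pvArea b) i c' hm y hyt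
    · cases hm : pvMid t ar with
      | none => rw [hm] at h; simp at h
      | some ic =>
        cases ic with
        | mk i c' =>
          rw [hm] at h; simp at h
          obtain ⟨hk, hc⟩ := h
          subst hc
          have hb' := pvMid_lt t ar i c' hm
          rcases List.mem_cons.mp hy with rfl | hyt
          · omega
          · exact ih ar i c' hm y hyt

theorem pvMid_lower : ∀ (bs : List (Int × Int × Int × Int)) (ar1 ar2 : Int) (k : Nat) (c : (Int × Int × Int × Int)),
    pvMid bs ar2 = some (k, c) → ar1 < pvArea c → pvMid bs ar1 = some (k, c) := by
  intro bs
  induction bs with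
  | nil => intro ar1 ar2 k c h _; simp [pvMid] at h
  | cons b t ih =>
    intro ar1 ar2 k c h h1
    simp only [pvMid] at h ⊢
    split_ifs at h with hb2
    · by_cases hb1 : ar1 < pvArea b
      · rw [if_pos hb1]; exact h
      · rw [if_neg hb1]
        cases hm : pvMid t (pvArea b) with
        | none =>
          rw [hm] at h; simp at h
          obtain ⟨hk, hc⟩ := h
          subst hc
          omega
        | some ic =>
          cases ic with
          | mk i c' =>
            rw [hm] at h; simp at h
            obtain ⟨hk, hc⟩ := h
            subst hc; subst hk
            rw [ih ar1 (pvArea b) i c' hm h1]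
    · cases hm : pvMid t ar2 with
      | none => rw [hm] at h; simp at h
      | some ic =>
        cases ic with
        | mk i c' =>
          rw [hm] at h; simp at h
          obtain ⟨hk, hc⟩ := h
          subst hc; subst hk
          have hc' := pvMid_lt t ar2 i c' hm
          by_cases hb1 : ar1 < pvArea b
          · rw [if_pos hb1]
            rw [ih (pvArea b) ar2 i c' hm (by omega)]
          · rw [if_neg hb1]
            rw [ih ar1 ar2 i c' hm h1]

theorem pvKeyB_natCast (boxes : List (Int × Int × Int × Int)) (k : Nat) :
    pvKeyB boxes (k : Int) = -(pvArea (boxes.getD k (0, 0, 0, 0))) := by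
  simp [pvKeyB, pvArea, PySem.List.pyGetD_natCast]

-- the head of B's stable insertion sort is the running first-minimum of the key
theorem pvHeadFoldl (key : Int → Int) : ∀ (xs : List Int) (m : Int) (t : List Int),
    ∃ t', xs.foldl (fun acc x => PySem.List.insertBy (fun a b => decide (key a < key b)) x acc) (m :: t) =
      (xs.foldl (fun m' x => if key x < key m' then x else m') m) :: t' := by
  intro xs
  induction xs with
  | nil => intro m t; exact ⟨t, rfl⟩
  | cons x xs ih =>
    intro m t
    simp only [List.foldl_cons]
    by_cases h : key x < key m
    · rw [show PySem.List.insertBy (fun a b => decide (key a < key b)) x (m :: t) = x :: m :: t from by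
        simp [PySem.List.insertBy, h]]
      rw [if_pos h]
      exact ih x (m :: t)
    · rw [show PySem.List.insertBy (fun a b => decide (key a < key b)) x (m :: t) =
          m :: PySem.List.insertBy (fun a b => decide (key a < key b)) x t from by
        simp [PySem.List.insertBy, h]]
      rw [if_neg h]
      exact ih m _

-- the running first-minimum of -(area) over the remaining indices, read through pvMid
theorem pvRM (boxes : List (Int × Int × Int × Int)) : ∀ (bs : List (Int × Int × Int × Int)) (s : Nat),
    boxes.drop s = bs → ∀ (k : Nat), k < boxes.length →
    (PySem.List.pyRange (s : Int) (boxes.length : Int) 1).foldl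
      (fun m x => if pvKeyB boxes x < pvKeyB boxes m then x else m) ((k : Nat) : Int) =
    (match pvMid bs (pvArea (boxes.getD k (0, 0, 0, 0))) with
     | none => ((k : Nat) : Int)
     | some (j, _) => (s : Int) + (j : Int)) := by
  intro bs
  induction bs with
  | nil =>
    intro s hs k hk
    have hle : (boxes.length : Int) ≤ (s : Int) := by
      exact_mod_cast List.drop_eq_nil_iff.mp hs
    rw [PySem.List.pyRange_one_eq_nil hle]
    simp [pvMid]
  | cons b bs' ih =>
    intro s hs k hk
    have hsl : s < boxes.length := by
      by_contra hh
      rw [List.drop_eq_nil_iff.mpr (by omega)] at hs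
      simp at hs
    have hget : boxes.drop s = boxes[s] :: boxes.drop (s + 1) := List.drop_eq_getElem_cons hsl
    rw [hget] at hs
    have hb : boxes.getD s (0, 0, 0, 0) = b := by
      rw [List.getD_eq_getElem _ _ hsl]
      exact (List.cons.injEq _ _ _ _ ▸ hs).1
    have hdrop : boxes.drop (s + 1) = bs' := (List.cons.injEq _ _ _ _ ▸ hs).2
    rw [PySem.List.pyRange_one_cons (by exact_mod_cast hsl), List.foldl_cons]
    by_cases hcond : pvArea (boxes.getD k (0, 0, 0, 0)) < pvArea b
    · rw [if_pos (by rw [pvKeyB_natCast, pvKeyB_natCast, hb]; omega)]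
      have ihr := ih (s + 1) hdrop s hsl
      rw [hb] at ihr
      rw [show ((s : Int) + 1) = (((s + 1 : Nat)) : Int) by push_cast; ring]
      rw [ihr]
      simp only [pvMid, if_pos hcond]
      cases pvMid bs' (pvArea b) with
      | none => norm_num
      | some jc => cases jc with | mk j c => push_cast; ring
    · rw [if_neg (by rw [pvKeyB_natCast, pvKeyB_natCast, hb]; omega)]
      have ihr := ih (s + 1) hdrop k hk
      rw [show ((s : Int) + 1) = (((s + 1 : Nat)) : Int) by push_cast; ring]
      rw [ihr]
      simp only [pvMid, if_neg hcond]
      cases pvMid bs' (pvArea (boxes.getD k (0, 0, 0, 0))) with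
      | none => norm_num
      | some jc => cases jc with | mk j c => push_cast; ring

-- B equals the pvMid-characterised result
theorem pop_end_tile_py_alt_char (boxes : List (Int × Int × Int × Int)) :
    pop_end_tile_py_alt boxes =
      (match pvMid boxes 34999 with
       | none => (boxes, none)
       | some (k, c) => (boxes.eraseIdx k, some c)) := by
  cases boxes with
  | nil =>
    show pop_end_tile_py_alt [] = ([], none)
    unfold pop_end_tile_py_alt
    rw [show ((List.length ([] : List (Int × Int × Int × Int))) : Int) = 0 from by simp]
    rw [PySem.List.pyRange_one_eq_nil (le_refl 0), PySem.List.sorted_eq_foldl_insertBy]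
    rfl
  | cons x t =>
    have h01 : (0 : Int) < ((x :: t).length : Int) := by exact_mod_cast Nat.succ_pos t.length
    have hr : PySem.List.pyRange 0 ((x :: t).length : Int) 1 =
        (0 : Int) :: PySem.List.pyRange 1 ((x :: t).length : Int) 1 := by
      simpa using PySem.List.pyRange_one_cons h01
    obtain ⟨t', ht'⟩ := pvHeadFoldl (pvKeyB (x :: t)) (PySem.List.pyRange 1 ((x :: t).length : Int) 1) 0 []
    have hsorted : PySem.List.sorted (PySem.List.pyRange 0 ((x :: t).length : Int) 1) (pvKeyB (x :: t)) =
        ((PySem.List.pyRange 1 ((x :: t).length : Int) 1).foldl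
          (fun m' y => if pvKeyB (x :: t) y < pvKeyB (x :: t) m' then y else m') 0) :: t' := by
      rw [PySem.List.sorted_eq_foldl_insertBy, hr, List.foldl_cons]
      rw [show PySem.List.insertBy (fun a b => decide (pvKeyB (x :: t) a < pvKeyB (x :: t) b)) 0 ([] : List Int) = [0] from by
        simp [PySem.List.insertBy]]
      exact ht'
    have hi0 : (PySem.List.pyRange 1 ((x :: t).length : Int) 1).foldl
        (fun m' y => if pvKeyB (x :: t) y < pvKeyB (x :: t) m' then y else m') 0 =
        (match pvMid t (pvArea x) with
         | none => (0 : Int)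
         | some (j, _) => 1 + (j : Int)) := by
      have h := pvRM (x :: t) t 1 (by simp) 0 (Nat.succ_pos t.length)
      simpa using h
    have hB : pop_end_tile_py_alt (x :: t) =
        (if (PySem.List.pyGetD (x :: t) ((PySem.List.pyRange 1 ((x :: t).length : Int) 1).foldl
              (fun m' y => if pvKeyB (x :: t) y < pvKeyB (x :: t) m' then y else m') 0) (0, 0, 0, 0)).2.2.1 *
            (PySem.List.pyGetD (x :: t) ((PySem.List.pyRange 1 ((x :: t).length : Int) 1).foldl
              (fun m' y => if pvKeyB (x :: t) y < pvKeyB (x :: t) m' then y else m') 0) (0, 0, 0, 0)).2.2.2 < 35000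
         then ((x :: t), none)
         else (PySem.List.slice (x :: t) none (some ((PySem.List.pyRange 1 ((x :: t).length : Int) 1).foldl
                  (fun m' y => if pvKeyB (x :: t) y < pvKeyB (x :: t) m' then y else m') 0)) ++
               PySem.List.slice (x :: t) (some ((PySem.List.pyRange 1 ((x :: t).length : Int) 1).foldl
                  (fun m' y => if pvKeyB (x :: t) y < pvKeyB (x :: t) m' then y else m') 0 + 1)) none,
               some (PySem.List.pyGetD (x :: t) ((PySem.List.pyRange 1 ((x :: t).length : Int) 1).foldl
                  (fun m' y => if pvKeyB (x :: t) y < pvKeyB (x :: t) m' then y else m') 0) (0, 0, 0, 0)))) := by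
      unfold pop_end_tile_py_alt
      rw [hsorted]
    cases hm : pvMid t (pvArea x) with
    | none =>
      have h0 : (PySem.List.pyRange 1 ((x :: t).length : Int) 1).foldl
          (fun m' y => if pvKeyB (x :: t) y < pvKeyB (x :: t) m' then y else m') 0 = (0 : Int) := by
        rw [hi0, hm]
      rw [hB, h0]
      have hx0 : PySem.List.pyGetD (x :: t) 0 (0, 0, 0, 0) = x := by
        rw [show (0 : Int) = ((0 : Nat) : Int) from by simp, PySem.List.pyGetD_natCast]
        rfl
      rw [hx0]
      by_cases hxa : x.2.2.1 * x.2.2.2 < 35000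
      · rw [if_pos hxa]
        rw [show pvMid (x :: t) 34999 = none from by
          rw [pvMid_none_iff]
          intro y hy
          rcases List.mem_cons.mp hy with rfl | hyt
          · simp only [pvArea]; omega
          · have := (pvMid_none_iff t (pvArea x)).mp hm y hyt
            simp only [pvArea] at this ⊢; omega]
      · rw [if_neg hxa]
        have h35 : (34999 : Int) < pvArea x := by simp only [pvArea]; omega
        rw [show pvMid (x :: t) 34999 = some (0, x) from by simp only [pvMid, if_pos h35, hm]]
        rw [show (0 : Int) + 1 = ((1 : Nat) : Int) from by norm_num]
        rw [show (0 : Int) = ((0 : Nat) : Int) from by simp]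
        rw [PySem.List.slice_to_natCast, PySem.List.slice_from_natCast]
        simp
    | some jc =>
      cases jc with
      | mk j c =>
        have h1 : (PySem.List.pyRange 1 ((x :: t).length : Int) 1).foldl
            (fun m' y => if pvKeyB (x :: t) y < pvKeyB (x :: t) m' then y else m') 0 = 1 + (j : Int) := by
          rw [hi0, hm]
        rw [hB, h1]
        obtain ⟨hj, hc⟩ := pvMid_getElem t (pvArea x) j c hm
        have hcx : pvArea x < pvArea c := pvMid_lt t (pvArea x) j c hm
        have hgd : PySem.List.pyGetD (x :: t) (1 + (j : Int)) (0, 0, 0, 0) = c := by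
          rw [show (1 : Int) + (j : Int) = ((j + 1 : Nat) : Int) from by push_cast; ring,
            PySem.List.pyGetD_natCast]
          show t.getD j (0, 0, 0, 0) = c
          rw [List.getD_eq_getElem _ _ hj]
          exact hc.symm
        rw [hgd]
        by_cases hca : c.2.2.1 * c.2.2.2 < 35000
        · rw [if_pos hca]
          rw [show pvMid (x :: t) 34999 = none from by
            rw [pvMid_none_iff]
            intro y hy
            rcases List.mem_cons.mp hy with rfl | hyt
            · simp only [pvArea] at hcx ⊢; omega
            · have := pvMid_max t (pvArea x) j c hm y hyt
              simp only [pvArea] at this ⊢; omega]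
        · rw [if_neg hca]
          have h35c : (34999 : Int) < pvArea c := by simp only [pvArea]; omega
          rw [show pvMid (x :: t) 34999 = some (j + 1, c) from by
            by_cases hx35 : (34999 : Int) < pvArea x
            · simp only [pvMid, if_pos hx35, hm]
            · simp only [pvMid, if_neg hx35, pvMid_lower t 34999 (pvArea x) j c hm h35c]]
          rw [show PySem.List.slice (x :: t) none (some ((1 : Int) + (j : Int))) = (x :: t).take (j + 1) from by
            rw [show (1 : Int) + (j : Int) = ((j + 1 : Nat) : Int) from by push_cast; ring,
              PySem.List.slice_to_natCast]]
          rw [show PySem.List.slice (x :: t) (some ((1 : Int) + (j : Int) + 1)) none = (x :: t).drop (j + 2) from by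
            rw [show (1 : Int) + (j : Int) + 1 = ((j + 2 : Nat) : Int) from by push_cast; ring,
              PySem.List.slice_from_natCast]]
          show (List.take (j + 1) (x :: t) ++ List.drop (j + 2) (x :: t), some c) =
              ((x :: t).eraseIdx (j + 1), some c)
          rw [List.eraseIdx_eq_take_drop_succ]

-- ===== VERDICT (by name: the statement is the Claim_ definition above) =====
theorem pop_end_tile_py_spec : Claim_equal_pop_end_tile_py := by
  intro boxes _
  unfold Spec_pop_end_tile_py
  rw [pop_end_tile_py_char, pop_end_tile_py_alt_char]
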